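-- pv_equiv track=rewrite | github.com/YingqianChen/RentWise-dev | comparer.py | _rank_values
-- ===== SOURCE A (Python) =====
-- from typing import Dict, Optional, List, Any
--
-- def _rank_values(values: List, lower_better: bool = True) -> List[int]:
--     """Rank values, handling None/unknown. 1 = best rank"""
--     n = len(values)
--     # Handle None values by treating them as worst
--     valid_indices = [(i, v) for i, v in enumerate(values) if v is not None and v != 0]
--
--     if not valid_indices:
--         return [n] * n  # All tied for worst
--
--     sorted_indices = sorted(valid_indices, key=lambda x: x[1], reverse=not lower_better)
--     rankings = [n + 1] * n  # Default to worst rank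
--
--     for rank, (idx, _) in enumerate(sorted_indices, 1):
--         rankings[idx] = rank
--
--     return rankings
-- ===== SOURCE B (Python) =====
-- def _rank_values(values, lower_better=True):
--     """Rank values, handling None/unknown. 1 = best rank"""
--     n = len(values)
--     valid = [i for i, v in enumerate(values) if v is not None and v != 0]
--     if not valid:
--         return [n] * n
--     vset = set(valid)
--
--     def precedes(j, i):
--         vj, vi = values[j], values[i]
--         if lower_better:
--             return vj < vi or (vj == vi and j < i)
--         return vj > vi or (vj == vi and j < i)
--
--     return [1 + sum(1 for j in valid if precedes(j, i)) if i in vset else n + 1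
--             for i in range(n)]
-- ===== Notes on version B (the rewrite author's own statement) =====
-- stated objective: alternative
-- what changed: Replaces the stable sort plus rank-assignment loop by a direct counting formulation: each valid index gets 1 + the number of valid indices that strictly precede it in the (value, original index) order, invalid ones get n+1.
import Mathlib
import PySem

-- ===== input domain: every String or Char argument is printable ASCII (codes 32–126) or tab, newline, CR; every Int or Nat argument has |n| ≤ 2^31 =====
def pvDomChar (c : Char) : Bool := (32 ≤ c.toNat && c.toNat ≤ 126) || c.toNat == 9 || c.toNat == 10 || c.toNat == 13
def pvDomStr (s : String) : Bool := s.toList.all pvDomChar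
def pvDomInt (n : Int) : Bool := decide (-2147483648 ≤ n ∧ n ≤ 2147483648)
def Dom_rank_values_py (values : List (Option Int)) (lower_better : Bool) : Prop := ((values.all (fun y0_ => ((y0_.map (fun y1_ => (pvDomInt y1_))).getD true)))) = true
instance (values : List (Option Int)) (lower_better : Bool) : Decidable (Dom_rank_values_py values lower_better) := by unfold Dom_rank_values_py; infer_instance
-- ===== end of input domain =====

-- B replaces A's stable sort + rank-assignment loop by directly counting, for each valid
-- index, how many valid indices strictly precede it in the (value, original index) order
-- (objective: alternative decomposition, same cost).

-- ===== PORT A =====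
def rank_values_py (values : List (Option Int)) (lower_better : Bool) : List Int :=
  let n : Int := values.length
  let valid_indices : List (Int × Int) :=
    (PySem.List.enumerate values 0).foldl (fun acc p =>
      match p.2 with
      | none => acc
      | some v => if v ≠ 0 then acc ++ [(p.1, v)] else acc) []
  if valid_indices = [] then List.replicate values.length n
  else
    let sorted_indices := PySem.List.sorted valid_indices (fun p => p.2) (!lower_better)
    let rankings : List Int := List.replicate values.length (n + 1)
    -- rankings[idx] = rank; idx is a nonnegative in-range list index, so .toNat is exact
    (PySem.List.enumerate sorted_indices 1).foldl
      (fun rk q => rk.set q.2.1.toNat q.1) rankings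

-- ===== PORT B =====
def pvValAt (values : List (Option Int)) (j : Int) : Int :=
  ((PySem.List.pyGet? values j).getD none).getD 0

def pvPrecedes (values : List (Option Int)) (lower_better : Bool) (j i : Int) : Bool :=
  let vj := pvValAt values j
  let vi := pvValAt values i
  if lower_better then (vj < vi) || (vj == vi && j < i)
  else (vj > vi) || (vj == vi && j < i)

def rank_values_py_alt (values : List (Option Int)) (lower_better : Bool) : List Int :=
  let n : Int := values.length
  let valid : List Int :=
    (PySem.List.enumerate values 0).foldl (fun acc p =>
      match p.2 with
      | none => acc
      | some v => if v ≠ 0 then acc ++ [p.1] else acc) []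
  if valid = [] then List.replicate values.length n
  else
    let vset : PySem.Set Int := PySem.Set.ofList valid
    (PySem.List.pyRange 0 n 1).map (fun i =>
      if PySem.Set.contains vset i then
        1 + ((valid.countP (fun j => pvPrecedes values lower_better j i)) : Int)
      else n + 1)

-- ===== PRECONDITION & SPEC =====
def Spec_rank_values_py (values : List (Option Int)) (lower_better : Bool) (out : List Int) : Prop := out = rank_values_py_alt values lower_better
instance (values : List (Option Int)) (lower_better : Bool) (out : List Int) : Decidable (Spec_rank_values_py values lower_better out) := by unfold Spec_rank_values_py; infer_instance

-- ===== CLAIM (what is proved, stated in full; the proofs are below) =====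
def Claim_equal_rank_values_py : Prop := ∀ (values : List (Option Int)) (lower_better : Bool), Dom_rank_values_py values lower_better → Spec_rank_values_py values lower_better (rank_values_py values lower_better)

-- ===== LEMMAS AND PROOFS =====

def pvOk (p : Int × Option Int) : Bool :=
  match p.2 with | none => false | some v => decide (v ≠ 0)
def pvG (p : Int × Option Int) : Int × Int := (p.1, p.2.getD 0)
def pvF (values : List (Option Int)) : List (Int × Option Int) :=
  (PySem.List.enumerate values 0).filter pvOk

lemma foldl_valid_pairs (values : List (Option Int)) :
    (PySem.List.enumerate values 0).foldl (fun acc p =>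
      match p.2 with
      | none => acc
      | some v => if v ≠ 0 then acc ++ [(p.1, v)] else acc) [] = (pvF values).map pvG := by
  have hf : (fun (acc : List (Int × Int)) (p : Int × Option Int) =>
      match p.2 with
      | none => acc
      | some v => if v ≠ 0 then acc ++ [(p.1, v)] else acc)
      = (fun acc p => if pvOk p then acc ++ [pvG p] else acc) := by
    funext acc p
    rcases p with ⟨a, _ | v⟩
    · simp [pvOk]
    · by_cases h : v = 0 <;> simp [pvOk, pvG, h]
  rw [hf, PySem.List.foldl_append_if]
  simp [pvF]

lemma foldl_valid_idx (values : List (Option Int)) :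
    (PySem.List.enumerate values 0).foldl (fun acc p =>
      match p.2 with
      | none => acc
      | some v => if v ≠ 0 then acc ++ [p.1] else acc) [] = (pvF values).map (·.1) := by
  have hf : (fun (acc : List Int) (p : Int × Option Int) =>
      match p.2 with
      | none => acc
      | some v => if v ≠ 0 then acc ++ [p.1] else acc)
      = (fun acc p => if pvOk p then acc ++ [p.1] else acc) := by
    funext acc p
    rcases p with ⟨a, _ | v⟩
    · simp [pvOk]
    · by_cases h : v = 0 <;> simp [pvOk, h]
  rw [hf, PySem.List.foldl_append_if]
  simp [pvF]

lemma pvF_pairwise (values : List (Option Int)) :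
    (pvF values).Pairwise (fun p q => p.1 < q.1) := by
  exact (PySem.List.pairwise_lt_enumerate values 0).sublist List.filter_sublist

lemma mem_pvF (values : List (Option Int)) {p : Int × Option Int} (hp : p ∈ pvF values) :
    0 ≤ p.1 ∧ p.1 < (values.length : Int) ∧ p.2 = some (pvValAt values p.1) ∧ pvValAt values p.1 ≠ 0 := by
  have hmem := List.mem_of_mem_filter hp
  have hok : pvOk p := List.of_mem_filter hp
  rw [PySem.List.mem_enumerate_iff] at hmem
  obtain ⟨k, hk, rfl⟩ := hmem
  have hget : PySem.List.pyGet? values ((0:Int) + k) = some values[k] := by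
    simp [hk]
  refine ⟨by positivity, by simpa using hk, ?_, ?_⟩ <;>
  · rcases h : values[k] with _ | v
    · rw [h] at hok; simp [pvOk] at hok
    · simp_all [pvValAt, pvOk]

def pvKlt (rev : Bool) (p q : Int × Int) : Prop := if rev then q.2 < p.2 else p.2 < q.2
def pvR (rev : Bool) (p q : Int × Int) : Prop := pvKlt rev p q ∨ (p.2 = q.2 ∧ p.1 < q.1)
-- Bool form of pvR (no extra Decidable instances are allowed in this file)
def pvRb (rev : Bool) (p q : Int × Int) : Bool :=
  if rev then (decide (q.2 < p.2) || (decide (p.2 = q.2) && decide (p.1 < q.1)))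
  else (decide (p.2 < q.2) || (decide (p.2 = q.2) && decide (p.1 < q.1)))

lemma pvRb_eq (rev : Bool) (p q : Int × Int) : pvRb rev p q = true ↔ pvR rev p q := by
  unfold pvRb pvR pvKlt
  cases rev <;> simp
def pvB (rev : Bool) : (Int × Int) → (Int × Int) → Bool :=
  if rev then fun a b => decide (b.2 < a.2) else fun a b => decide (a.2 < b.2)

lemma insertBy_pairwise (rev : Bool) (x : Int × Int) (acc : List (Int × Int))
    (hacc : acc.Pairwise (pvR rev))
    (hlt : ∀ p ∈ acc, p.1 < x.1) :
    (PySem.List.insertBy (pvB rev) x acc).Pairwise (pvR rev) := by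
  induction acc with
  | nil => simp [PySem.List.insertBy]
  | cons y ys ih =>
    have hlty := hlt y (by simp)
    rcases List.pairwise_cons.mp hacc with ⟨hy, hys⟩
    by_cases hb : pvKlt rev x y
    · have hfront : PySem.List.insertBy (pvB rev) x (y :: ys) = x :: y :: ys := by
        cases rev <;> simp [pvKlt] at hb <;> simp [PySem.List.insertBy, pvB, hb]
      rw [hfront]
      refine List.pairwise_cons.mpr ⟨?_, hacc⟩
      intro z hz
      rcases List.mem_cons.mp hz with rfl | hz'
      · exact Or.inl hb
      · have hyz := hy z hz'
        left
        unfold pvR at hyz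
        unfold pvKlt at hb hyz ⊢
        cases rev <;> simp at hb hyz ⊢ <;> omega
    · have hrest : PySem.List.insertBy (pvB rev) x (y :: ys)
          = y :: PySem.List.insertBy (pvB rev) x ys := by
        cases rev <;> simp [pvKlt] at hb <;> simp [PySem.List.insertBy, pvB, hb]
      rw [hrest]
      refine List.pairwise_cons.mpr ⟨?_, ih hys (fun p hp => hlt p (by simp [hp]))⟩
      intro z hz
      rcases (PySem.List.mem_insertBy _ _ _ _).mp hz with rfl | hz'
      · unfold pvKlt at hb
        unfold pvR pvKlt
        cases rev <;> simp at hb ⊢ <;> omega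
      · exact hy z hz'

lemma sorted_pairwise_pvR (rev : Bool) (L : List (Int × Int))
    (hL : L.Pairwise (fun p q => p.1 < q.1)) :
    (PySem.List.sorted L (fun p => p.2) rev).Pairwise (pvR rev) := by
  have key : ∀ (M : List (Int × Int)) (acc : List (Int × Int)),
      M.Pairwise (fun p q => p.1 < q.1) →
      acc.Pairwise (pvR rev) →
      (∀ p ∈ acc, ∀ q ∈ M, p.1 < q.1) →
      (M.foldl (fun acc x => PySem.List.insertBy (pvB rev) x acc) acc).Pairwise (pvR rev) := by
    intro M
    induction M with
    | nil => intro acc _ h _; simpa using h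
    | cons x M' ih =>
      intro acc hM hacc hcross
      rcases List.pairwise_cons.mp hM with ⟨hx, hM'⟩
      simp only [List.foldl_cons]
      apply ih _ hM'
      · exact insertBy_pairwise rev x acc hacc (fun p hp => hcross p hp x (by simp))
      · intro p hp q hq
        rcases (PySem.List.mem_insertBy _ _ _ _).mp hp with rfl | hp'
        · exact hx q hq
        · exact hcross p hp' q (by simp [hq])
  cases rev
  · rw [PySem.List.sorted_eq_foldl_insertBy]
    exact key L [] hL (by simp) (by simp)
  · rw [PySem.List.sorted_rev_eq_foldl_insertBy]
    exact key L [] hL (by simp) (by simp)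

lemma pvR_asymm (rev : Bool) (p q : Int × Int) (h1 : pvR rev p q) (h2 : pvR rev q p) : False := by
  unfold pvR pvKlt at h1 h2; cases rev <;> simp at h1 h2 <;> omega

lemma pvR_irrefl (rev : Bool) (p : Int × Int) : ¬ pvR rev p p := by
  unfold pvR pvKlt; cases rev <;> simp

lemma countP_eq_of_iff {α : Type} (L : List α) (p : α → Bool) (r : Nat)
    (hr : r ≤ L.length) (h : ∀ a (ha : a < L.length), (p L[a] = true ↔ a < r)) :
    L.countP p = r := by
  induction L generalizing r with
  | nil => simpa using (Nat.le_zero.mp hr).symm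
  | cons x t ih =>
    rcases r with _ | r'
    · have hx : p x = false := by
        have := h 0 (by simp)
        simpa using this
      rw [List.countP_cons, hx]
      simp only [Bool.false_eq_true, if_false, Nat.add_zero]
      exact ih 0 (by simp) (fun a ha => by
        have := h (a+1) (by simpa using Nat.succ_lt_succ ha)
        simpa using this)
    · have hx : p x = true := by
        have := h 0 (by simp)
        simpa using this.mpr (Nat.succ_pos r')
      rw [List.countP_cons, hx, if_pos rfl]
      rw [ih r' (by simpa using Nat.succ_le_succ_iff.mp hr) (fun a ha => by
        have := h (a+1) (by simpa using Nat.succ_lt_succ ha)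
        simpa [Nat.succ_lt_succ_iff] using this)]

lemma pos_eq_countP (rev : Bool) (s : List (Int × Int)) (hs : s.Pairwise (pvR rev))
    (r : Nat) (hr : r < s.length) :
    s.countP (fun q => pvRb rev q s[r]) = r := by
  apply countP_eq_of_iff _ _ _ (le_of_lt hr)
  intro a ha
  have hpw := List.pairwise_iff_getElem.mp hs
  constructor
  · intro hp
    by_contra hge
    rcases Nat.lt_or_ge r a with hlt | hge2
    · exact pvR_asymm rev _ _ ((pvRb_eq _ _ _).mp hp) (hpw r a hr ha hlt)
    · have : a = r := by omega
      subst this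
      exact pvR_irrefl rev _ ((pvRb_eq _ _ _).mp hp)
  · intro hlt
    exact (pvRb_eq _ _ _).mpr (hpw a r ha hr hlt)

lemma setfold_length (L : List (Int × Int)) (start : Int) (rk : List Int) :
    ((PySem.List.enumerate L start).foldl (fun rk q => rk.set q.2.1.toNat q.1) rk).length
      = rk.length := by
  induction L generalizing start rk with
  | nil => simp [PySem.List.enumerate]
  | cons x t ih => rw [PySem.List.enumerate_cons]; simp [ih]

lemma setfold_untouched (L : List (Int × Int)) (start : Int) (rk : List Int) (i : Nat)
    (h0 : ∀ p ∈ L, 0 ≤ p.1) (h : ∀ p ∈ L, p.1 ≠ (i : Int)) :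
    ((PySem.List.enumerate L start).foldl (fun rk q => rk.set q.2.1.toNat q.1) rk)[i]?
      = rk[i]? := by
  induction L generalizing start rk with
  | nil => simp [PySem.List.enumerate]
  | cons x t ih =>
    rw [PySem.List.enumerate_cons]
    simp only [List.foldl_cons]
    rw [ih _ _ (fun p hp => h0 p (by simp [hp])) (fun p hp => h p (by simp [hp]))]
    apply List.getElem?_set_ne
    have hx0 := h0 x (by simp)
    have hxi := h x (by simp)
    omega

lemma setfold_hit (L : List (Int × Int)) (start : Int) (rk : List Int) (i : Nat)
    (h0 : ∀ p ∈ L, 0 ≤ p.1) (hnd : L.Pairwise (fun p q => p.1 ≠ q.1))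
    (r : Nat) (hr : r < L.length) (hri : L[r].1 = (i : Int)) (hi : i < rk.length) :
    ((PySem.List.enumerate L start).foldl (fun rk q => rk.set q.2.1.toNat q.1) rk)[i]?
      = some (start + r) := by
  induction L generalizing start rk r with
  | nil => simp at hr
  | cons x t ih =>
    rw [PySem.List.enumerate_cons]
    simp only [List.foldl_cons]
    rcases List.pairwise_cons.mp hnd with ⟨hxnd, hnd'⟩
    rcases r with _ | r'
    · simp only [List.getElem_cons_zero] at hri
      rw [setfold_untouched t _ _ i (fun p hp => h0 p (by simp [hp]))
        (fun p hp => by rw [← hri]; exact fun he => hxnd p hp he.symm)]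
      have hxt : x.1.toNat = i := by omega
      rw [hxt, List.getElem?_set_self (by omega)]
      simp
    · simp only [List.getElem_cons_succ] at hri
      rw [ih _ _ (fun p hp => h0 p (by simp [hp])) hnd' r' (by simpa using Nat.succ_lt_succ_iff.mp hr) hri (by simpa)]
      push_cast; ring_nf

-- ===== VERDICT (by name: the statement is the Claim_ definition above) =====
theorem rank_values_py_spec : Claim_equal_rank_values_py := by
  intro values lower_better _hdom
  unfold Spec_rank_values_py rank_values_py rank_values_py_alt
  simp only [foldl_valid_pairs, foldl_valid_idx]
  by_cases hFe : pvF values = []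
  · simp [hFe]
  · rw [if_neg (by simpa using hFe), if_neg (by simpa using hFe)]
    set n : Int := (values.length : Int) with hn
    set F := pvF values with hFdef
    set s := PySem.List.sorted (F.map pvG) (fun p => p.2) (!lower_better) with hsdef
    have hFpw := pvF_pairwise values
    have hLpw : (F.map pvG).Pairwise (fun p q : Int × Int => p.1 < q.1) :=
      List.pairwise_map.mpr (hFpw.imp (fun h => h))
    have hsperm : s.Perm (F.map pvG) := PySem.List.sorted_perm _ _ _
    have hspw : s.Pairwise (pvR (!lower_better)) := sorted_pairwise_pvR _ _ hLpw
    have hmem_s : ∀ p ∈ s, ∃ q ∈ F, p = pvG q := by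
      intro p hp
      rcases List.mem_map.mp (hsperm.mem_iff.mp hp) with ⟨q, hq, hqe⟩
      exact ⟨q, hq, hqe.symm⟩
    have hs0 : ∀ p ∈ s, 0 ≤ p.1 := by
      intro p hp
      rcases hmem_s p hp with ⟨q, hq, rfl⟩
      exact (mem_pvF values hq).1
    have hsnd : s.Pairwise (fun p q : Int × Int => p.1 ≠ q.1) := by
      have h1 : ((F.map pvG).map Prod.fst).Nodup := by
        apply List.pairwise_map.mpr
        apply List.pairwise_map.mpr
        refine hFpw.imp ?_
        intro a b h
        show (pvG a).1 ≠ (pvG b).1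
        simpa [pvG] using ne_of_lt h
      have h2 : (s.map Prod.fst).Nodup := ((hsperm.map Prod.fst).nodup_iff).mpr h1
      exact List.pairwise_map.mp h2
    apply List.ext_getElem?
    intro i
    have hlenR : ((PySem.List.pyRange 0 n 1).map (fun i =>
        if PySem.Set.contains (PySem.Set.ofList (F.map (·.1))) i then
          1 + (((F.map (·.1)).countP (fun j => pvPrecedes values lower_better j i)) : Int)
        else n + 1)).length = values.length := by
      rw [List.length_map, PySem.List.pyRange_of_pos 0 n (by norm_num)]
      simp only [List.length_map, List.length_range]
      by_cases h0 : 0 < n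
      · rw [if_pos h0]
        simp [hn]
      · rw [if_neg h0]
        have : values.length = 0 := by omega
        simp [this]
    have hlenL : ((PySem.List.enumerate s 1).foldl (fun rk q => rk.set q.2.1.toNat q.1)
        (List.replicate values.length (n + 1))).length = values.length := by
      rw [setfold_length]; simp
    by_cases hi : i < values.length
    · -- in range
      have hRHS : ((PySem.List.pyRange 0 n 1).map (fun i =>
          if PySem.Set.contains (PySem.Set.ofList (F.map (·.1))) i then
            1 + (((F.map (·.1)).countP (fun j => pvPrecedes values lower_better j i)) : Int)
          else n + 1))[i]? = some (
          if PySem.Set.contains (PySem.Set.ofList (F.map (·.1))) (i : Int) then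
            1 + (((F.map (·.1)).countP (fun j => pvPrecedes values lower_better j (i : Int))) : Int)
          else n + 1) := by
        rw [List.getElem?_map, PySem.List.getElem?_pyRange_one]
        rw [if_pos (by simp [hn]; omega)]
        simp
      rw [hRHS]
      by_cases hvi : (i : Int) ∈ F.map (·.1)
      · -- valid index
        rcases List.mem_map.mp hvi with ⟨p, hpF, hpi⟩
        have hpe : pvG p ∈ s := hsperm.mem_iff.mpr (List.mem_map_of_mem hpF)
        rcases List.getElem_of_mem hpe with ⟨r, hr, hre⟩
        have hmp := mem_pvF values hpF
        have hri : s[r].1 = (i : Int) := by rw [hre]; simpa [pvG] using hpi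
        rw [setfold_hit s 1 _ i hs0 hsnd r hr hri (by simpa using hi)]
        rw [if_pos (by simp [PySem.Set.contains, PySem.Set.mem_ofList, hvi])]
        have hcnt : s.countP (fun q => pvRb (!lower_better) q s[r]) = r :=
          pos_eq_countP _ _ hspw r hr
        have hc2 : s.countP (fun q => pvRb (!lower_better) q s[r])
            = (F.map (·.1)).countP (fun j => pvPrecedes values lower_better j (i : Int)) := by
          rw [hsperm.countP_eq, List.countP_map, List.countP_map]
          apply List.countP_congr
          intro x hx
          have hmx := mem_pvF values hx
          have hx2 : (pvG x).2 = pvValAt values x.1 := by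
            simp [pvG, hmx.2.2.1]
          have hsr2 : s[r].2 = pvValAt values (i : Int) := by
            rw [hre]
            simp [pvG, hmp.2.2.1]
            rw [← hpi]
          have hsr1 : s[r].1 = (i : Int) := hri
          simp only [Function.comp]
          constructor
          · intro h
            have h' := (pvRb_eq _ _ _).mp h
            unfold pvR pvKlt at h'
            rw [hsr1, hsr2] at h'  -- hmm h' mentions s[r]
            unfold pvPrecedes
            cases lower_better <;> simp at h' ⊢ <;>
              rcases h' with h' | h' <;> simp [pvG] at * <;> omega
          · intro h
            rw [pvRb_eq]
            unfold pvPrecedes at h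
            unfold pvR pvKlt
            rw [hsr1, hsr2]
            cases lower_better <;> simp at h ⊢ <;> simp [pvG] at * <;> omega
        rw [hc2] at hcnt
        rw [hcnt]
      · -- invalid index
        have huntouched : ∀ p ∈ s, p.1 ≠ (i : Int) := by
          intro p hp hpe
          rcases hmem_s p hp with ⟨q, hq, rfl⟩
          exact hvi (List.mem_map.mpr ⟨q, hq, by simpa [pvG] using hpe⟩)
        rw [setfold_untouched s 1 _ i hs0 huntouched]
        rw [if_neg (by simp [PySem.Set.contains, PySem.Set.mem_ofList, hvi])]
        rw [List.getElem?_replicate, if_pos hi]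
    · -- out of range: both none
      rw [List.getElem?_eq_none (by omega), List.getElem?_eq_none (by rw [hlenR]; omega)]
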